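-- pv_equiv track=rewrite | github.com/blueflyingpanda/legal-bot | validators.py | is_name_correct
-- ===== SOURCE A (Python) =====
-- def is_name_correct(name):
--     digits = '0123456789'
--
--     for digit in digits:
--         if name.count(digit) > 0:
--             return False
--
--     words = name.split()
--
--     for word in words:
--         if word[0].islower():
--             return False
--
--     return True
-- ===== SOURCE B (Python) =====
-- def is_name_correct(name):
--     return (not any(c in '0123456789' for c in name)
--             and all(not w[0].islower() for w in name.split()))
-- ===== Notes on version B (the rewrite author's own statement) =====
-- stated objective: simpler
-- what changed: Replaces the two imperative early-return loops (ten full-string count scans over the digit alphabet, then a word loop) with one boolean expression: a single pass over the characters testing digit membership, combined with an all() over the split words.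
import Mathlib
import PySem

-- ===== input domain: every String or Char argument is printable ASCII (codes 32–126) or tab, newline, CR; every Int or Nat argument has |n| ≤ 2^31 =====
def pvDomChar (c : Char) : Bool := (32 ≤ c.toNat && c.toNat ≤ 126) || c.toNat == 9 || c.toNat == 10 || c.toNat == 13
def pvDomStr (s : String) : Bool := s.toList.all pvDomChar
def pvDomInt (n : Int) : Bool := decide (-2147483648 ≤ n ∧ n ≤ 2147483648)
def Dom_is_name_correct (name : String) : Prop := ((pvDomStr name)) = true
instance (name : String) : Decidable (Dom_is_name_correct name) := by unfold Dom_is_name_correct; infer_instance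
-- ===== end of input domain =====

-- B replaces A's two early-return loops (ten full-string count scans, then a word loop)
-- with one boolean expression: a single character pass plus an all() over the words (objective: simpler).

-- ===== PORT A =====
-- 'for digit in digits: if name.count(digit) > 0: return False'
def pvDigitLoop (name : String) : List Char → Bool
  | [] => true
  | d :: ds => if PySem.Str.count name (String.ofList [d]) > 0 then false else pvDigitLoop name ds

-- 'for word in words: if word[0].islower(): return False' ('none' is IndexError, unreachable: split() words are nonempty)
def pvWordLoop : List String → Bool
  | [] => true
  | w :: ws =>
    match PySem.Str.pyGet? w 0 with
    | some c => if PySem.Chars.islower c then false else pvWordLoop ws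
    | none => false

def is_name_correct (name : String) : Bool :=
  if pvDigitLoop name "0123456789".toList then pvWordLoop (PySem.Str.split₀ name) else true == false

-- ===== PORT B =====
def is_name_correct_alt (name : String) : Bool :=
  !(name.toList.any (fun c => "0123456789".toList.contains c)) &&
  (PySem.Str.split₀ name).all (fun w =>
    match PySem.Str.pyGet? w 0 with
    | some c => !PySem.Chars.islower c
    | none => false)

-- ===== PRECONDITION & SPEC =====
def Spec_is_name_correct (name : String) (out : Bool) : Prop := out = is_name_correct_alt name
instance (name : String) (out : Bool) : Decidable (Spec_is_name_correct name out) := by unfold Spec_is_name_correct; infer_instance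

-- ===== CLAIM (what is proved, stated in full; the proofs are below) =====
def Claim_equal_is_name_correct : Prop := ∀ (name : String), Dom_is_name_correct name → Spec_is_name_correct name (is_name_correct name)

-- ===== LEMMAS AND PROOFS =====

theorem pvCountGoSingle (c : Char) : ∀ (fuel : Nat) (l : List Char) (acc : Nat),
    l.length ≤ fuel → PySem.Chars.count.go [c] fuel l acc = acc + l.count c := by
  intro fuel
  induction fuel with
  | zero =>
    intro l acc h
    have : l = [] := List.eq_nil_of_length_eq_zero (Nat.le_zero.mp h)
    subst this; simp [PySem.Chars.count.go]
  | succ n ih =>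
    intro l acc h
    cases l with
    | nil => simp [PySem.Chars.count.go]
    | cons x t =>
      have hlen : t.length ≤ n := by simpa using h
      by_cases hx : c = x
      · subst hx
        simp [PySem.Chars.count.go, List.isPrefixOf, ih _ _ hlen]
        omega
      · have hpf : ([c].isPrefixOf (x :: t)) = false := by
          simp [List.isPrefixOf]; exact hx
        simp [PySem.Chars.count.go, hpf, ih _ _ hlen, List.count_cons]
        exact fun e => hx e.symm

theorem pvCountSingle (s : String) (c : Char) :
    PySem.Str.count s (String.ofList [c]) = s.toList.count c := by
  have h1 : PySem.Str.count s (String.ofList [c]) = PySem.Chars.count s.toList [c] := by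
    simp [PySem.Str.count_eq]
  rw [h1]
  have h2 := pvCountGoSingle c s.toList.length s.toList 0 le_rfl
  simp only [PySem.Chars.count, List.isEmpty_cons, Bool.false_eq_true, if_false] at h2 ⊢
  omega

theorem pvDigitLoopEq (name : String) : ∀ ds : List Char,
    pvDigitLoop name ds = ds.all (fun d => !(name.toList.contains d)) := by
  intro ds
  induction ds with
  | nil => rfl
  | cons d ds ih =>
    simp only [pvDigitLoop, List.all_cons, pvCountSingle]
    by_cases h : d ∈ name.toList
    · have : 0 < name.toList.count d := List.count_pos_iff.mpr h
      simp [this, h]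
    · have : name.toList.count d = 0 := List.count_eq_zero.mpr h
      simp [this, h, ih]

theorem pvSwap (s : List Char) (ds : List Char) :
    ds.all (fun d => !(s.contains d)) = !(s.any (fun c => ds.contains c)) := by
  rw [Bool.eq_iff_iff]
  simp [List.all_eq_true]
  constructor
  · intro h c hc hm; exact h _ hm hc
  · intro h d hd hm; exact h _ hm hd

theorem pvWordLoopEq : ∀ ws : List String,
    pvWordLoop ws = ws.all (fun w =>
      match PySem.Str.pyGet? w 0 with
      | some c => !PySem.Chars.islower c
      | none => false) := by
  intro ws
  induction ws with
  | nil => rfl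
  | cons w ws ih =>
    simp only [pvWordLoop, List.all_cons]
    cases h : PySem.Str.pyGet? w 0 with
    | none => simp
    | some c => by_cases hl : PySem.Chars.islower c <;> simp [hl, ih]

-- ===== VERDICT (by name: the statement is the Claim_ definition above) =====
theorem is_name_correct_spec : Claim_equal_is_name_correct := by
  intro name _
  unfold Spec_is_name_correct is_name_correct is_name_correct_alt
  rw [pvDigitLoopEq, pvSwap, pvWordLoopEq]
  cases h : name.toList.any (fun c => "0123456789".toList.contains c)
  · simp [h]
  · rfl
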